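-- pv_equiv track=rewrite | github.com/RINGCHEN/TradingAgents-Production-Complete | tradingagents/coordination/qa_guardian.py | _categorize_defects
-- ===== SOURCE A (Python) =====
-- from typing import Dict, List, Optional, Any, Union
--
-- def _categorize_defects(defects: List[Dict[str, Any]]) -> Dict[str, int]:
--     """分類缺陷"""
--     categories = {
--         'functional': 0,
--         'performance': 0,
--         'usability': 0,
--         'security': 0,
--         'compatibility': 0,
--         'other': 0
--     }
--
--     for defect in defects:
--         # 簡化的分類邏輯
--         description = defect.get('description', '').lower()
--         if 'functional' in description or 'function' in description:
--             categories['functional'] += 1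
--         elif 'performance' in description or 'slow' in description:
--             categories['performance'] += 1
--         elif 'security' in description or 'auth' in description:
--             categories['security'] += 1
--         else:
--             categories['functional'] += 1  # 默認為功能缺陷
--
--     return categories
-- ===== SOURCE B (Python) =====
-- from typing import Dict, List, Optional, Any, Union
--
-- def _hits(desc, keywords):
--     return any(k in desc for k in keywords)
--
-- def _categorize_defects(defects: List[Dict[str, Any]]) -> Dict[str, int]:
--     descs = [d.get('description', '').lower() for d in defects]
--     n_perf = sum(1 for s in descs
--                  if not _hits(s, ('functional', 'function'))
--                  and _hits(s, ('performance', 'slow')))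
--     n_sec = sum(1 for s in descs
--                 if not _hits(s, ('functional', 'function'))
--                 and not _hits(s, ('performance', 'slow'))
--                 and _hits(s, ('security', 'auth')))
--     # everything else (keyword match or default) lands in 'functional'
--     return {'functional': len(defects) - n_perf - n_sec,
--             'performance': n_perf,
--             'usability': 0,
--             'security': n_sec,
--             'compatibility': 0,
--             'other': 0}
-- ===== Notes on version B (the rewrite author's own statement) =====
-- stated objective: alternative
-- what changed: Replaces the single mutating if/elif loop over a counter dict by staged filtered counts: two generator-sum passes count the performance and security defects via boolean predicates, and the functional count (matches plus default) is derived arithmetically as len(defects) - n_perf - n_sec, so no default branch and no dict mutation exist.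
import Mathlib
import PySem

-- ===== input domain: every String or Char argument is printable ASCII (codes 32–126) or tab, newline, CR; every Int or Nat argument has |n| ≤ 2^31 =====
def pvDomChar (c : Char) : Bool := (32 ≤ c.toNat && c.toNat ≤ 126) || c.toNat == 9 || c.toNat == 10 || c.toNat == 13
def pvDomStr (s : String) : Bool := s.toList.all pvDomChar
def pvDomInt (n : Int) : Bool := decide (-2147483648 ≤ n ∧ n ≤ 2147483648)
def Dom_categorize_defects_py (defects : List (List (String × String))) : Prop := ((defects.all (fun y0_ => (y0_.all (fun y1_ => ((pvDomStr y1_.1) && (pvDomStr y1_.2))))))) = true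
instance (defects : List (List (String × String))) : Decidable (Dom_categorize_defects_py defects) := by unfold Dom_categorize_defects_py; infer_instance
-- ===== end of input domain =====

-- B replaces A's mutating if/elif loop by staged filtered counts (performance, security) and derives
-- the functional count arithmetically as length - n_perf - n_sec (objective: alternative; same cost).

-- ===== PORT A =====
def categorize_defects_py (defects : List (List (String × String))) : List (String × Int) :=
  let categories : PySem.Dict String Int :=
    PySem.Dict.mk [("functional", 0), ("performance", 0), ("usability", 0),
                   ("security", 0), ("compatibility", 0), ("other", 0)]
  let categories := defects.foldl (fun cats defect =>
    let description := PySem.Str.lower ((PySem.Dict.mk defect).getD "description" "")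
    if PySem.Str.isIn "functional" description || PySem.Str.isIn "function" description then
      cats.modify "functional" 0 (· + 1)
    else if PySem.Str.isIn "performance" description || PySem.Str.isIn "slow" description then
      cats.modify "performance" 0 (· + 1)
    else if PySem.Str.isIn "security" description || PySem.Str.isIn "auth" description then
      cats.modify "security" 0 (· + 1)
    else
      cats.modify "functional" 0 (· + 1)) categories
  categories.items

-- ===== PORT B =====
def pvHits (desc : String) (keywords : List String) : Bool :=
  keywords.any (fun k => PySem.Str.isIn k desc)

def categorize_defects_py_alt (defects : List (List (String × String))) : List (String × Int) :=
  let descs := defects.map (fun d => PySem.Str.lower ((PySem.Dict.mk d).getD "description" ""))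
  -- sum(1 for s in descs if <pred>) ported as countP
  let nPerf : Int := (descs.countP (fun s =>
      !pvHits s ["functional", "function"] && pvHits s ["performance", "slow"]) : Nat)
  let nSec : Int := (descs.countP (fun s =>
      !pvHits s ["functional", "function"] && !pvHits s ["performance", "slow"]
        && pvHits s ["security", "auth"]) : Nat)
  [("functional", (defects.length : Int) - nPerf - nSec),
   ("performance", nPerf),
   ("usability", 0),
   ("security", nSec),
   ("compatibility", 0),
   ("other", 0)]

-- ===== PRECONDITION & SPEC =====
def Spec_categorize_defects_py (defects : List (List (String × String))) (out : List (String × Int)) : Prop := out = categorize_defects_py_alt defects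
instance (defects : List (List (String × String))) (out : List (String × Int)) : Decidable (Spec_categorize_defects_py defects out) := by unfold Spec_categorize_defects_py; infer_instance

-- ===== CLAIM (what is proved, stated in full; the proofs are below) =====
def Claim_equal_categorize_defects_py : Prop := ∀ (defects : List (List (String × String))), Dom_categorize_defects_py defects → Spec_categorize_defects_py defects (categorize_defects_py defects)

-- ===== LEMMAS AND PROOFS =====

-- Proof-only helpers: the label A's if/elif chain selects for a (lowered) description.
def pvClassifyS (desc : String) : String :=
  if PySem.Str.isIn "functional" desc || PySem.Str.isIn "function" desc then "functional"
  else if PySem.Str.isIn "performance" desc || PySem.Str.isIn "slow" desc then "performance"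
  else if PySem.Str.isIn "security" desc || PySem.Str.isIn "auth" desc then "security"
  else "functional"

def pvDescOf (defect : List (String × String)) : String :=
  PySem.Str.lower ((PySem.Dict.mk defect).getD "description" "")

theorem classifyS_mem (s : String) :
    pvClassifyS s = "functional" ∨ pvClassifyS s = "performance" ∨ pvClassifyS s = "security" := by
  unfold pvClassifyS; split_ifs <;> simp

-- A's loop body is: bump the counter of the selected label.
theorem hbody :
    (fun (cats : PySem.Dict String Int) (defect : List (String × String)) =>
      let description := PySem.Str.lower ((PySem.Dict.mk defect).getD "description" "")
      if PySem.Str.isIn "functional" description || PySem.Str.isIn "function" description then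
        cats.modify "functional" 0 (· + 1)
      else if PySem.Str.isIn "performance" description || PySem.Str.isIn "slow" description then
        cats.modify "performance" 0 (· + 1)
      else if PySem.Str.isIn "security" description || PySem.Str.isIn "auth" description then
        cats.modify "security" 0 (· + 1)
      else
        cats.modify "functional" 0 (· + 1))
    = (fun cats defect => cats.modify (pvClassifyS (pvDescOf defect)) 0 (· + 1)) := by
  funext cats defect
  show (if PySem.Str.isIn "functional" (pvDescOf defect) || PySem.Str.isIn "function" (pvDescOf defect) then
        cats.modify "functional" 0 (· + 1)
      else if PySem.Str.isIn "performance" (pvDescOf defect) || PySem.Str.isIn "slow" (pvDescOf defect) then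
        cats.modify "performance" 0 (· + 1)
      else if PySem.Str.isIn "security" (pvDescOf defect) || PySem.Str.isIn "auth" (pvDescOf defect) then
        cats.modify "security" 0 (· + 1)
      else
        cats.modify "functional" 0 (· + 1)) = _
  unfold pvClassifyS
  split_ifs <;> rfl

theorem modify_lit_functional (a b c d e f : Int) :
    (PySem.Dict.mk [("functional", a), ("performance", b), ("usability", c),
                    ("security", d), ("compatibility", e), ("other", f)]).modify "functional" 0 (· + 1)
    = PySem.Dict.mk [("functional", a + 1), ("performance", b), ("usability", c),
                     ("security", d), ("compatibility", e), ("other", f)] := by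
  simp [PySem.Dict.modify, PySem.Dict.insert, PySem.Dict.getD, PySem.Dict.get?, PySem.Dict.contains,
        List.find?, List.any]

theorem modify_lit_performance (a b c d e f : Int) :
    (PySem.Dict.mk [("functional", a), ("performance", b), ("usability", c),
                    ("security", d), ("compatibility", e), ("other", f)]).modify "performance" 0 (· + 1)
    = PySem.Dict.mk [("functional", a), ("performance", b + 1), ("usability", c),
                     ("security", d), ("compatibility", e), ("other", f)] := by
  simp [PySem.Dict.modify, PySem.Dict.insert, PySem.Dict.getD, PySem.Dict.get?, PySem.Dict.contains,
        List.find?, List.any]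

theorem modify_lit_security (a b c d e f : Int) :
    (PySem.Dict.mk [("functional", a), ("performance", b), ("usability", c),
                    ("security", d), ("compatibility", e), ("other", f)]).modify "security" 0 (· + 1)
    = PySem.Dict.mk [("functional", a), ("performance", b), ("usability", c),
                     ("security", d + 1), ("compatibility", e), ("other", f)] := by
  simp [PySem.Dict.modify, PySem.Dict.insert, PySem.Dict.getD, PySem.Dict.get?, PySem.Dict.contains,
        List.find?, List.any]

-- A's counting loop: each key ends at its start value plus its label's multiplicity.
theorem foldl_modify_items (defects : List (List (String × String))) (a b c d e f : Int) :
    (defects.foldl (fun cats defect => cats.modify (pvClassifyS (pvDescOf defect)) 0 (· + 1))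
      (PySem.Dict.mk [("functional", a), ("performance", b), ("usability", c),
                      ("security", d), ("compatibility", e), ("other", f)])).items
    = [("functional", a + List.count "functional" (defects.map (fun x => pvClassifyS (pvDescOf x)))),
       ("performance", b + List.count "performance" (defects.map (fun x => pvClassifyS (pvDescOf x)))),
       ("usability", c),
       ("security", d + List.count "security" (defects.map (fun x => pvClassifyS (pvDescOf x)))),
       ("compatibility", e),
       ("other", f)] := by
  induction defects generalizing a b c d e f with
  | nil => simp
  | cons x xs ih =>
    rcases classifyS_mem (pvDescOf x) with hx | hx | hx <;>
      rw [List.foldl_cons, hx] <;>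
      simp only [modify_lit_functional, modify_lit_performance, modify_lit_security, ih,
                 List.map_cons, List.count_cons, hx] <;>
      simp <;> ring

-- B's predicates count exactly the labels A's chain selects.
theorem count_perf (descs : List String) :
    List.count "performance" (descs.map pvClassifyS)
      = descs.countP (fun s => !pvHits s ["functional", "function"] && pvHits s ["performance", "slow"]) := by
  induction descs with
  | nil => rfl
  | cons s ss ih =>
    simp only [List.map_cons, List.count_cons, List.countP_cons, ih, pvClassifyS, pvHits,
               List.any_cons, List.any_nil, Bool.or_false]
    split_ifs <;> simp_all

theorem count_sec (descs : List String) :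
    List.count "security" (descs.map pvClassifyS)
      = descs.countP (fun s => !pvHits s ["functional", "function"] && !pvHits s ["performance", "slow"]
          && pvHits s ["security", "auth"]) := by
  induction descs with
  | nil => rfl
  | cons s ss ih =>
    simp only [List.map_cons, List.count_cons, List.countP_cons, ih, pvClassifyS, pvHits,
               List.any_cons, List.any_nil, Bool.or_false]
    split_ifs <;> simp_all

-- The three label counts partition the list, so functional = length - performance - security.
theorem count_func (descs : List String) :
    (List.count "functional" (descs.map pvClassifyS) : Int)
      = (descs.length : Int) - List.count "performance" (descs.map pvClassifyS)
          - List.count "security" (descs.map pvClassifyS) := by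
  induction descs with
  | nil => rfl
  | cons s ss ih =>
    rcases classifyS_mem s with hx | hx | hx <;>
      simp only [List.map_cons, List.count_cons, List.length_cons, hx] <;>
      simp <;> omega

-- ===== VERDICT (by name: the statement is the Claim_ definition above) =====
theorem categorize_defects_py_spec : Claim_equal_categorize_defects_py := by
  intro defects _
  unfold Spec_categorize_defects_py categorize_defects_py categorize_defects_py_alt
  simp only [hbody, foldl_modify_items]
  have hdescs : defects.map (fun d => PySem.Str.lower ((PySem.Dict.mk d).getD "description" ""))
      = defects.map pvDescOf := rfl
  have h1 := count_perf (defects.map pvDescOf)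
  have h2 := count_sec (defects.map pvDescOf)
  have h3 := count_func (defects.map pvDescOf)
  simp only [hdescs, List.countP_map, List.map_map] at *
  simp only [Function.comp_def] at *
  rw [← h1, ← h2]
  simp only [List.length_map] at h3
  simp [h3]
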